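-- pv_equiv track=rewrite | github.com/foreverxujiahuan/algorithm | 竞赛/A307/B.py | largestPalindromic
-- ===== SOURCE A (Python) =====
-- from collections import Counter
--
-- def largestPalindromic(num: str) -> str:
--     counter = Counter(num)
--     first_ch = ''
--     for i in range(9, -1, -1):
--         if counter.get(str(i)) and counter.get(str(i)) % 2 == 1:
--             first_ch = str(i)
--             break
--     counter[first_ch] = counter[first_ch] - 1
--     if first_ch:
--         ans = first_ch
--     else:
--         ans = ''
--     for i in range(10):
--         if counter.get(str(i)):
--             n = counter[str(i)] // 2
--             ans = str(i) * n + ans + str(i) * n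
--     ans = ans.strip("0")
--     if not ans:
--         return '0'
--     return ans
-- ===== SOURCE B (Python) =====
-- def largestPalindromic(num: str) -> str:
--     # Sort the digits descending, then pair adjacent equal digits in one scan:
--     # each adjacent pair goes into the left half, the first unpaired digit
--     # (the largest odd-count one) becomes the center.
--     ds = sorted((c for c in num if c.isdigit()), reverse=True)
--     half = []
--     center = ''
--     i = 0
--     n = len(ds)
--     while i < n:
--         if i + 1 < n and ds[i] == ds[i + 1]:
--             half.append(ds[i])
--             i += 2
--         else:
--             if not center:
--                 center = ds[i]
--             i += 1
--     if half and half[0] == '0':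
--         half = []
--     h = ''.join(half)
--     return (h + center + h[::-1]) or '0'
-- ===== Notes on version B (the rewrite author's own statement) =====
-- stated objective: alternative
-- what changed: Replaces A's Counter-based count-then-wrap build (prepend/append count//2 copies per digit around the odd center, then strip zeros) with sort-then-scan: sort the digits descending and pair adjacent equal digits in a single scan, the first unpaired digit becoming the center, dropping the half only when it begins with a zero digit.
import Mathlib
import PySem

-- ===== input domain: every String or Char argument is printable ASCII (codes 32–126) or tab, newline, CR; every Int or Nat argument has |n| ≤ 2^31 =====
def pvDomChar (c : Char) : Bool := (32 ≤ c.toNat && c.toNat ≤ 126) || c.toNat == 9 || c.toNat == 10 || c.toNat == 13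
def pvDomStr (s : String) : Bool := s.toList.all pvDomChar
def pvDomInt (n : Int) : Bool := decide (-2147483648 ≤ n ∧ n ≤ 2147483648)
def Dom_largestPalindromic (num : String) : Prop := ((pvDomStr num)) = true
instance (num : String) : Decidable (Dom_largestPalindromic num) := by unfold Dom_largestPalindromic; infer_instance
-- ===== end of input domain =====

-- B replaces A's Counter-based count-then-wrap build (prepend/append count//2 copies per digit
-- around the odd center, then strip zeros from both ends) by sort-then-scan: sort the digits
-- descending, pair adjacent equal digits in one scan (first unpaired digit = center), and drop
-- the half only when it begins with a zero digit (alternative algorithm, similar cost).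

-- ===== PORT A =====

-- str(i) * n for a one-digit string, over List Char (n ≤ 0 gives '')
def pvRep (cs : List Char) (n : Int) : List Char := (List.replicate n.toNat cs).flatten

-- 'for i in range(9,-1,-1): if counter.get(str(i)) and counter.get(str(i)) % 2 == 1: first_ch = str(i); break'
-- (None and 0 are falsy; the loop is structural recursion over the range list)
def pvFirstOddA (counter : PySem.Dict (List Char) Int) : List Int → List Char
  | [] => []
  | i :: rest =>
    match counter.get? (PySem.Int.toChars i) with
    | some v => if ¬(v = 0) ∧ PySem.Int.mod v 2 = 1 then PySem.Int.toChars i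
                else pvFirstOddA counter rest
    | none => pvFirstOddA counter rest

def largestPalindromic (num : String) : String :=
  -- counter = Counter(num): keys are the 1-character strings, modelled as List Char
  let counter := PySem.Dict.counter (num.toList.map (fun c => [c]))
  let first_ch := pvFirstOddA counter (PySem.List.pyRange 9 (-1) (-1))
  -- counter[first_ch] = counter[first_ch] - 1  (Counter __getitem__ defaults to 0)
  let counter := counter.insert first_ch (counter.getD first_ch 0 - 1)
  -- 'ans = first_ch if first_ch else '''
  let ans := if ¬(first_ch = []) then first_ch else []
  -- 'for i in range(10): if counter.get(str(i)): n = counter[str(i)] // 2; ans = str(i)*n + ans + str(i)*n'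
  let ans := (PySem.List.pyRange 0 10 1).foldl (fun ans i =>
    match counter.get? (PySem.Int.toChars i) with
    | some v =>
      if ¬(v = 0) then
        let n := PySem.Int.floordiv v 2
        pvRep (PySem.Int.toChars i) n ++ ans ++ pvRep (PySem.Int.toChars i) n
      else ans
    | none => ans) ans
  -- ans = ans.strip("0"); return '0' if not ans else ans
  let ans := PySem.Chars.stripChars ans ['0']
  if ans = [] then "0" else String.mk ans

-- ===== PORT B =====

-- the while loop of Source B: walk the sorted digit list, pairing adjacent equal digits into
-- 'half' and letting the first unpaired digit become 'center' (the index walk i/i+1 is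
-- ported as recursion consuming the list, one or two elements per step, exactly as the loop)
def pvScanB : List Char → List Char → List Char → List Char × List Char
  | [], half, center => (half, center)
  | [d], half, center => (half, if center = [] then [d] else center)
  | d :: e :: rest, half, center =>
      if d = e then pvScanB rest (half ++ [d]) center
      else pvScanB (e :: rest) half (if center = [] then [d] else center)
termination_by xs _ _ => xs.length

def largestPalindromic_alt (num : String) : String :=
  -- ds = sorted((c for c in num if c.isdigit()), reverse=True)
  let ds := PySem.List.sorted (num.toList.filter PySem.Chars.isdigit) (fun c => c) true
  let hc := pvScanB ds [] []
  let half := hc.1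
  let center := hc.2
  -- 'if half and half[0] == '0': half = []'  (the guard ensures half ≠ [], so headD is exact)
  let half := if ¬half = [] ∧ half.headD ' ' = '0' then [] else half
  -- h = ''.join(half); return (h + center + h[::-1]) or '0'
  let res := half ++ center ++ half.reverse
  if res = [] then "0" else String.mk res

-- ===== PRECONDITION & SPEC =====
def Spec_largestPalindromic (num : String) (out : String) : Prop := out = largestPalindromic_alt num
instance (num : String) (out : String) : Decidable (Spec_largestPalindromic num out) := by unfold Spec_largestPalindromic; infer_instance

-- ===== CLAIM (what is proved, stated in full; the proofs are below) =====
def Claim_equal_largestPalindromic : Prop := ∀ (num : String), Dom_largestPalindromic num → Spec_largestPalindromic num (largestPalindromic num)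

-- ===== LEMMAS AND PROOFS =====

theorem pvRep_single (c : Char) (n : Int) : pvRep [c] n = List.replicate n.toNat c := by
  unfold pvRep
  generalize n.toNat = k
  induction k with
  | zero => rfl
  | succ k ih => simp [List.replicate_succ, ih]

theorem pv_counter_get? (l : List Char) (d : Char) :
    (PySem.Dict.counter (l.map (fun c => [c]))).get? [d]
      = if l.count d = 0 then none else some ((l.count d : Nat) : Int) := by
  have hc : List.count [d] (l.map (fun c => [c])) = l.count d :=
    List.count_map_of_injective l (fun c => [c]) (fun a b h => by simpa using h) d
  have hD := PySem.Dict.getD_counter (l.map (fun c => [c])) [d]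
  rw [hc] at hD
  have hcontains := PySem.Dict.contains_counter (l.map (fun c => [c])) [d]
  by_cases h : l.count d = 0
  · rw [if_pos h]
    rw [PySem.Dict.get?_eq_none_iff_contains]
    rw [hcontains]
    have : [d] ∉ l.map (fun c => [c]) := by
      rw [← List.count_eq_zero, hc]; exact h
    simpa using this
  · rw [if_neg h]
    cases hgg : (PySem.Dict.counter (l.map (fun c => [c]))).get? [d] with
    | none =>
      exfalso
      have hcf := (PySem.Dict.get?_eq_none_iff_contains _ _).mp hgg
      rw [hcontains] at hcf
      have : [d] ∈ l.map (fun c => [c]) := by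
        rw [← List.count_pos_iff, hc]; omega
      simp [this] at hcf
    | some w =>
      simp only [PySem.Dict.getD, hgg, Option.getD_some] at hD
      rw [hD]

def pvDg (n : Nat) : Char := Char.ofNat (48 + n)

theorem pv_char_eq {c d : Char} (h : c.toNat = d.toNat) : c = d := by
  apply Char.ext
  apply UInt32.toNat_inj.mp
  exact h

theorem pv_dg_toNat (n : Nat) (hn : n < 10) : (pvDg n).toNat = 48 + n := by
  unfold pvDg; interval_cases n <;> decide

theorem pv_dg_inj : ∀ a < 10, ∀ b < 10, pvDg a = pvDg b → a = b := by decide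

-- the digit characters in descending order; runs and the first-odd center over them
def pvRunsOf (l : List Char) : List Char → List Char
  | [] => []
  | c :: t => List.replicate (l.count c) c ++ pvRunsOf l t

def pvHalfOf (l : List Char) : List Char → List Char
  | [] => []
  | c :: t => List.replicate (l.count c / 2) c ++ pvHalfOf l t

def pvFirstOdd (l : List Char) : List Char → List Char
  | [] => []
  | c :: t => if l.count c % 2 = 1 then [c] else pvFirstOdd l t

theorem pv_mem_runsOf (l : List Char) (ds : List Char) (x : Char) (h : x ∈ pvRunsOf l ds) : x ∈ ds := by
  induction ds with
  | nil => simp [pvRunsOf] at h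
  | cons c t ih =>
    simp only [pvRunsOf, List.mem_append, List.mem_replicate] at h
    rcases h with ⟨-, rfl⟩ | h
    · exact List.mem_cons_self
    · exact List.mem_cons_of_mem _ (ih h)

theorem pv_runsOf_pairwise (l : List Char) (ds : List Char)
    (hds : ds.Pairwise (fun a b => b ≤ a)) :
    (pvRunsOf l ds).Pairwise (fun a b => b ≤ a) := by
  induction ds with
  | nil => simp [pvRunsOf]
  | cons c t ih =>
    rw [List.pairwise_cons] at hds
    simp only [pvRunsOf]
    rw [List.pairwise_append]
    refine ⟨List.pairwise_replicate.mpr (Or.inr le_rfl), ih hds.2, ?_⟩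
    intro x hx y hy
    rw [List.mem_replicate] at hx
    rw [hx.2]
    exact hds.1 y (pv_mem_runsOf l t y hy)

theorem pv_digit_cases (c : Char) (hd : PySem.Chars.isdigit c = true) :
    c ∈ (['9','8','7','6','5','4','3','2','1','0'] : List Char) := by
  have hb : '0' ≤ c ∧ c ≤ '9' := by simpa [PySem.Chars.isdigit] using hd
  have h48 : 48 ≤ c.toNat := hb.1
  have h57 : c.toNat ≤ 57 := hb.2
  obtain ⟨k, hk10, hc⟩ : ∃ k, k < 10 ∧ c = pvDg k :=
    ⟨c.toNat - 48, by omega, pv_char_eq (by rw [pv_dg_toNat _ (by omega)]; omega)⟩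
  subst hc
  interval_cases k <;> decide

theorem pv_not_digit_ne (c d : Char) (hd : PySem.Chars.isdigit c = false)
    (h : PySem.Chars.isdigit d = true) : c ≠ d := by
  rintro rfl; rw [hd] at h; cases h

theorem pv_runs_count (l : List Char) (c : Char) :
    (pvRunsOf l ['9','8','7','6','5','4','3','2','1','0']).count c
      = (l.filter PySem.Chars.isdigit).count c := by
  have hfil : (l.filter PySem.Chars.isdigit).count c
      = if PySem.Chars.isdigit c then l.count c else 0 := by
    split_ifs with h
    · exact List.count_filter h
    · exact List.count_eq_zero.mpr (fun hm => by simp [List.mem_filter, h] at hm)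
  rw [hfil]
  by_cases hd : PySem.Chars.isdigit c = true
  · rw [if_pos hd]
    have hmem := pv_digit_cases c hd
    fin_cases hmem <;>
      simp [pvRunsOf, List.count_append, List.count_replicate]
  · rw [if_neg hd]
    rw [Bool.not_eq_true] at hd
    have h9 := pv_not_digit_ne c '9' hd (by decide)
    have h8 := pv_not_digit_ne c '8' hd (by decide)
    have h7 := pv_not_digit_ne c '7' hd (by decide)
    have h6 := pv_not_digit_ne c '6' hd (by decide)
    have h5 := pv_not_digit_ne c '5' hd (by decide)
    have h4 := pv_not_digit_ne c '4' hd (by decide)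
    have h3 := pv_not_digit_ne c '3' hd (by decide)
    have h2 := pv_not_digit_ne c '2' hd (by decide)
    have h1 := pv_not_digit_ne c '1' hd (by decide)
    have h0 := pv_not_digit_ne c '0' hd (by decide)
    simp [pvRunsOf, List.count_append, List.count_replicate, Ne.symm h9, Ne.symm h8,
      Ne.symm h7, Ne.symm h6, Ne.symm h5, Ne.symm h4, Ne.symm h3, Ne.symm h2,
      Ne.symm h1, Ne.symm h0]

theorem pv_sorted_eq (l : List Char) :
    PySem.List.sorted (l.filter PySem.Chars.isdigit) (fun c => c) true
      = pvRunsOf l ['9','8','7','6','5','4','3','2','1','0'] := by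
  have hperm : (PySem.List.sorted (l.filter PySem.Chars.isdigit) (fun c => c) true).Perm
      (pvRunsOf l ['9','8','7','6','5','4','3','2','1','0']) := by
    refine (PySem.List.sorted_perm _ _ _).trans ?_
    exact (List.perm_iff_count.mpr (fun c => pv_runs_count l c)).symm
  have h1 : (PySem.List.sorted (l.filter PySem.Chars.isdigit) (fun c => c) true).Pairwise
      (fun a b => b ≤ a) := by
    have := PySem.List.sorted_pairwise_rev (l.filter PySem.Chars.isdigit) (fun c : Char => c)
    simpa using this
  have h2 := pv_runsOf_pairwise l ['9','8','7','6','5','4','3','2','1','0'] (by decide)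
  exact hperm.eq_of_pairwise (by intro a b _ _ x y; exact le_antisymm y x) h1 h2

theorem pv_scan_run (d : Char) (k : Nat) (rest half center : List Char)
    (hne : ∀ e ∈ rest.head?, e ≠ d) :
    pvScanB (List.replicate k d ++ rest) half center
      = pvScanB rest (half ++ List.replicate (k / 2) d)
          (if k % 2 = 1 ∧ center = [] then [d] else center) := by
  induction k using Nat.strong_induction_on generalizing half center with
  | _ k ih =>
    match k with
    | 0 => simp [pvScanB]
    | 1 =>
      cases rest with
      | nil =>
        show pvScanB [d] half center = _
        by_cases hc : center = [] <;> simp [pvScanB, hc]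
      | cons e t =>
        have hed : ¬ d = e := fun h => hne e rfl h.symm
        show pvScanB (d :: e :: t) half center = _
        simp [pvScanB, hed]
    | (k + 2) =>
      have hrep : List.replicate (k + 2) d ++ rest = d :: d :: (List.replicate k d ++ rest) := by
        simp [List.replicate_succ]
      rw [hrep]
      show pvScanB (d :: d :: (List.replicate k d ++ rest)) half center = _
      rw [pvScanB]
      rw [if_pos rfl]
      rw [ih k (by omega) (half ++ [d]) center]
      have h1 : (k + 2) / 2 = k / 2 + 1 := by omega
      have h2 : (k + 2) % 2 = k % 2 := by omega
      rw [h1, h2]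
      congr 1
      simp [List.replicate_succ, List.append_assoc]

theorem pv_scan_runsOf (l : List Char) (ds : List Char) (hnd : ds.Nodup) :
    ∀ half center, pvScanB (pvRunsOf l ds) half center
      = (half ++ pvHalfOf l ds, if center = [] then pvFirstOdd l ds else center) := by
  induction ds with
  | nil =>
    intro half center
    by_cases hc : center = [] <;> simp [pvRunsOf, pvHalfOf, pvFirstOdd, pvScanB, hc]
  | cons c t ih =>
    intro half center
    rw [List.nodup_cons] at hnd
    have hne : ∀ e ∈ (pvRunsOf l t).head?, e ≠ c := by
      intro e he hec
      exact hnd.1 (hec ▸ pv_mem_runsOf l t e (List.mem_of_mem_head? he))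
    show pvScanB (List.replicate (l.count c) c ++ pvRunsOf l t) half center = _
    rw [pv_scan_run c (l.count c) (pvRunsOf l t) half center hne]
    rw [ih hnd.2]
    simp only [pvHalfOf, pvFirstOdd]
    rw [Prod.mk.injEq]
    constructor
    · simp [List.append_assoc]
    · by_cases hc : center = []
      · by_cases hodd : l.count c % 2 = 1
        · simp [hc, hodd]
        · simp [hc, hodd]
      · simp [hc, if_neg (fun h : (if l.count c % 2 = 1 ∧ center = [] then [c] else center) = [] => by
          rw [if_neg (fun hh => hc hh.2)] at h; exact hc h)]

theorem pvFirstOdd_shape (l : List Char) (ds : List Char) :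
    pvFirstOdd l ds = [] ∨ ∃ c ∈ ds, pvFirstOdd l ds = [c] ∧ l.count c % 2 = 1 := by
  induction ds with
  | nil => left; rfl
  | cons c t ih =>
    by_cases hodd : l.count c % 2 = 1
    · right; exact ⟨c, List.mem_cons_self, by simp [pvFirstOdd, hodd], hodd⟩
    · rw [show pvFirstOdd l (c :: t) = pvFirstOdd l t by simp [pvFirstOdd, hodd]]
      rcases ih with h | ⟨c', hc', h⟩
      · left; exact h
      · right; exact ⟨c', List.mem_cons_of_mem _ hc', h⟩

theorem pv_first_eq (counter : PySem.Dict (List Char) Int) (l : List Char) :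
    ∀ (L : List Int) (C : List Char),
      (∀ p ∈ L.zip C, PySem.Int.toChars p.1 = [p.2] ∧
        counter.get? [p.2] = (if l.count p.2 = 0 then none else some ((l.count p.2 : Nat) : Int))) →
      L.length = C.length →
      pvFirstOddA counter L = pvFirstOdd l C
  | [], [], _, _ => rfl
  | i :: L, c :: C, h, hlen => by
    obtain ⟨ht, hg⟩ := h (i, c) (by simp)
    have ih := pv_first_eq counter l L C (fun p hp => h p (by simp [hp])) (by simpa using hlen)
    by_cases h0 : l.count c = 0
    · rw [if_pos h0] at hg
      have hodd : ¬ l.count c % 2 = 1 := by omega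
      show pvFirstOddA counter (i :: L) = _
      simp only [pvFirstOddA, ht, hg]
      simp [pvFirstOdd, hodd, ih]
    · rw [if_neg h0] at hg
      show pvFirstOddA counter (i :: L) = _
      simp only [pvFirstOddA, ht, hg]
      by_cases hodd : l.count c % 2 = 1
      · have hcond : ¬((l.count c : Int) = 0) ∧ PySem.Int.mod (l.count c : Int) 2 = 1 := by
          constructor
          · exact_mod_cast h0
          · rw [PySem.Int.mod_eq_emod_of_pos (by omega)]; omega
        rw [if_pos hcond]
        simp [pvFirstOdd, hodd, ht]
      · have hcond : ¬(¬((l.count c : Int) = 0) ∧ PySem.Int.mod (l.count c : Int) 2 = 1) := by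
          rintro ⟨-, hm⟩
          rw [PySem.Int.mod_eq_emod_of_pos (by omega)] at hm
          omega
        rw [if_neg hcond]
        simp [pvFirstOdd, hodd, ih]

def pvRunA (counter : PySem.Dict (List Char) Int) (i : Int) : List Char :=
  match counter.get? (PySem.Int.toChars i) with
  | some v => if ¬(v = 0) then pvRep (PySem.Int.toChars i) (PySem.Int.floordiv v 2) else []
  | none => []

theorem pv_bodyA (counter : PySem.Dict (List Char) Int) :
    (fun (ans : List Char) (i : Int) =>
      match counter.get? (PySem.Int.toChars i) with
      | some v =>
        if ¬(v = 0) then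
          let n := PySem.Int.floordiv v 2
          pvRep (PySem.Int.toChars i) n ++ ans ++ pvRep (PySem.Int.toChars i) n
        else ans
      | none => ans)
    = fun ans i => pvRunA counter i ++ ans ++ pvRunA counter i := by
  funext ans i
  unfold pvRunA
  cases hg : counter.get? (PySem.Int.toChars i) with
  | none => simp [hg]
  | some v =>
    simp only [hg]
    split_ifs <;> simp

theorem pv_wrapfold (r : Int → List Char) (L : List Int) (a : List Char) :
    L.foldl (fun ans i => r i ++ ans ++ r i) a = L.reverse.flatMap r ++ a ++ L.flatMap r := by
  induction L generalizing a with
  | nil => simp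
  | cons i rest ih =>
    rw [List.foldl_cons, ih]
    simp [List.flatMap_append, List.append_assoc]

theorem pv_runA_of_get (counter2 : PySem.Dict (List Char) Int) (i : Int) (d : Char) (k : Nat)
    (ht : PySem.Int.toChars i = [d])
    (hg : counter2.get? [d] = if k = 0 then none else some ((k : Nat) : Int)) :
    pvRunA counter2 i = List.replicate (k / 2) d := by
  unfold pvRunA
  rw [ht, hg]
  by_cases hk : k = 0
  · simp [hk]
  · rw [if_neg hk]
    show (if ¬((k : Int) = 0) then pvRep [d] (PySem.Int.floordiv (k : Int) 2) else [])
        = List.replicate (k / 2) d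
    rw [if_pos (show ¬((k : Int) = 0) by exact_mod_cast hk)]
    have htn : ((k : Int) / 2).toNat = k / 2 := by omega
    rw [pvRep_single, PySem.Int.floordiv_eq_ediv_of_pos (by omega), htn]

theorem pv_runA_dec (counter2 : PySem.Dict (List Char) Int) (i : Int) (d : Char) (k : Nat)
    (ht : PySem.Int.toChars i = [d]) (hodd : k % 2 = 1)
    (hg : counter2.get? [d] = some ((k : Int) - 1)) :
    pvRunA counter2 i = List.replicate (k / 2) d := by
  unfold pvRunA
  rw [ht, hg]
  show (if ¬((k : Int) - 1 = 0) then pvRep [d] (PySem.Int.floordiv ((k : Int) - 1) 2) else [])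
      = List.replicate (k / 2) d
  by_cases h1 : (k : Int) - 1 = 0
  · have hk1 : k = 1 := by omega
    subst hk1
    rw [if_neg (not_not_intro h1)]
    simp
  · rw [if_pos h1]
    have htn : (((k : Int) - 1) / 2).toNat = k / 2 := by omega
    rw [pvRep_single, PySem.Int.floordiv_eq_ediv_of_pos (by omega), htn]

theorem pv_drop_rep0 (p : Char → Bool) (hp : p '0' = true) (n : Nat) (t : List Char) :
    List.dropWhile p (List.replicate n '0' ++ t) = List.dropWhile p t := by
  induction n with
  | zero => simp
  | succ n ih => simp [List.replicate_succ, List.dropWhile_cons, hp, ih]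

theorem pv_strip_allzero (m n : Nat) :
    PySem.Chars.stripChars (List.replicate m '0' ++ List.replicate n '0') ['0'] = [] := by
  show (List.dropWhile (fun c => (['0'] : List Char).contains c)
      (List.dropWhile (fun c => (['0'] : List Char).contains c)
        (List.replicate m '0' ++ List.replicate n '0')).reverse).reverse = []
  rw [pv_drop_rep0 _ (by decide)]
  rw [show List.replicate n '0' = List.replicate n '0' ++ [] by simp]
  rw [pv_drop_rep0 _ (by decide)]
  simp

theorem pv_strip_zero_center (m : Nat) :
    PySem.Chars.stripChars (List.replicate m '0' ++ ['0'] ++ List.replicate m '0') ['0'] = [] := by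
  have h : (List.replicate m '0' ++ ['0'] ++ List.replicate m '0' : List Char)
      = List.replicate m '0' ++ List.replicate (m + 1) '0' := by
    simp [List.replicate_succ, List.append_assoc]
  rw [h, pv_strip_allzero]

theorem pv_strip_single (m : Nat) (d : Char) (hd : (d == '0') = false) :
    PySem.Chars.stripChars (List.replicate m '0' ++ [d] ++ List.replicate m '0') ['0'] = [d] := by
  show (List.dropWhile (fun c => (['0'] : List Char).contains c)
      (List.dropWhile (fun c => (['0'] : List Char).contains c)
        (List.replicate m '0' ++ [d] ++ List.replicate m '0')).reverse).reverse = [d]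
  rw [List.append_assoc, pv_drop_rep0 _ (by decide)]
  rw [show ([d] ++ List.replicate m '0' : List Char) = d :: List.replicate m '0' by simp]
  rw [List.dropWhile_cons]
  simp only [List.contains_cons, hd, Bool.or_false, List.contains_nil]
  simp only [Bool.false_eq_true, if_false]
  rw [List.reverse_cons, List.reverse_replicate]
  rw [pv_drop_rep0 _ (by decide)]
  simp [List.dropWhile_cons, hd]

theorem pv_strip_sandwich (P M : List Char) (hP : P ≠ []) (h0 : '0' ∉ P) :
    PySem.Chars.stripChars (P ++ M ++ P.reverse) ['0'] = P ++ M ++ P.reverse := by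
  obtain ⟨a, t, rfl⟩ := List.exists_cons_of_ne_nil hP
  have ha : ((['0'] : List Char).contains a) = false := by
    simp only [List.contains_cons, List.contains_nil, Bool.or_false, beq_eq_false_iff_ne, ne_eq]
    intro h; exact h0 (by simp [h])
  show (List.dropWhile (fun c => (['0'] : List Char).contains c)
      (List.dropWhile (fun c => (['0'] : List Char).contains c)
        ((a :: t) ++ M ++ (a :: t).reverse)).reverse).reverse = (a :: t) ++ M ++ (a :: t).reverse
  have hd1 : List.dropWhile (fun c => (['0'] : List Char).contains c)
      ((a :: t) ++ M ++ (a :: t).reverse) = (a :: t) ++ M ++ (a :: t).reverse := by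
    rw [List.cons_append, List.cons_append, List.dropWhile_cons, ha]
    simp
  rw [hd1]
  have hrev : ((a :: t) ++ M ++ (a :: t).reverse).reverse
      = (a :: t) ++ (M.reverse ++ (a :: t).reverse) := by
    simp [List.reverse_append]
  rw [hrev]
  rw [List.cons_append, List.dropWhile_cons, ha]
  simp [List.reverse_append]

theorem pv_common2 (m9 m8 m7 m6 m5 m4 m3 m2 m1 m0 : Nat) (e H : List Char)
    (hH : H = List.replicate m9 '9' ++ (List.replicate m8 '8' ++ (List.replicate m7 '7' ++
      (List.replicate m6 '6' ++ (List.replicate m5 '5' ++ (List.replicate m4 '4' ++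
      (List.replicate m3 '3' ++ (List.replicate m2 '2' ++ (List.replicate m1 '1' ++
      List.replicate m0 '0')))))))))
    (hshape : e = [] ∨ e = ['0'] ∨ ∃ c, e = [c] ∧ (c == '0') = false) :
    (if PySem.Chars.stripChars (H ++ e ++ H.reverse) ['0'] = [] then "0"
     else String.mk (PySem.Chars.stripChars (H ++ e ++ H.reverse) ['0']))
    = (if (if ¬H = [] ∧ H.headD ' ' = '0' then [] else H) ++ e ++
          (if ¬H = [] ∧ H.headD ' ' = '0' then [] else H).reverse = [] then "0"
       else String.mk ((if ¬H = [] ∧ H.headD ' ' = '0' then [] else H) ++ e ++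
          (if ¬H = [] ∧ H.headD ' ' = '0' then [] else H).reverse)) := by
  set P : List Char := List.replicate m9 '9' ++ (List.replicate m8 '8' ++ (List.replicate m7 '7' ++
      (List.replicate m6 '6' ++ (List.replicate m5 '5' ++ (List.replicate m4 '4' ++
      (List.replicate m3 '3' ++ (List.replicate m2 '2' ++ List.replicate m1 '1'))))))) with hPdef
  have hPZ : H = P ++ List.replicate m0 '0' := by rw [hH, hPdef]; simp [List.append_assoc]
  by_cases hP : P = []
  · -- no nonzero pair: the half is all zeros (possibly empty)
    rw [hPZ, hP, List.nil_append]
    cases m0 with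
    | zero =>
      rw [show (List.replicate 0 '0' : List Char) = [] from rfl]
      have hguard : ¬(¬([] : List Char) = [] ∧ ([] : List Char).headD ' ' = '0') := by simp
      rw [if_neg hguard]
      simp only [List.nil_append, List.append_nil, List.reverse_nil]
      rcases hshape with rfl | rfl | ⟨c, rfl, hc⟩
      · decide
      · decide
      · have hs := pv_strip_single 0 c hc
        simp only [List.replicate_zero, List.nil_append, List.append_nil] at hs
        rw [hs]
    | succ m0' =>
      have hguard : ¬(List.replicate (m0' + 1) '0' : List Char) = [] ∧
          (List.replicate (m0' + 1) '0' : List Char).headD ' ' = '0' := by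
        simp [List.replicate_succ]
      rw [if_pos hguard]
      simp only [List.nil_append, List.append_nil, List.reverse_nil, List.reverse_replicate]
      rcases hshape with rfl | rfl | ⟨c, rfl, hc⟩
      · rw [show (List.replicate (m0' + 1) '0' ++ [] ++ List.replicate (m0' + 1) '0' : List Char)
            = List.replicate (m0' + 1) '0' ++ List.replicate (m0' + 1) '0' from by simp]
        rw [pv_strip_allzero]
      · rw [pv_strip_zero_center]
        simp
        decide
      · rw [pv_strip_single _ c hc]
  · -- some nonzero pair exists: nothing is stripped and the half is kept
    have h0 : '0' ∉ P := by
      rw [hPdef]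
      intro h
      simp only [List.mem_append, List.mem_replicate] at h
      rcases h with ⟨-,h⟩|⟨-,h⟩|⟨-,h⟩|⟨-,h⟩|⟨-,h⟩|⟨-,h⟩|⟨-,h⟩|⟨-,h⟩|⟨-,h⟩ <;>
        exact absurd h (by decide)
    obtain ⟨a, t, hat⟩ := List.exists_cons_of_ne_nil hP
    have ha0 : a ≠ '0' := fun h => h0 (by rw [hat, h]; exact List.mem_cons_self)
    have hhead : H.headD ' ' = a := by rw [hPZ, hat]; rfl
    have hguard : ¬(¬H = [] ∧ H.headD ' ' = '0') := by
      rintro ⟨-, hh⟩; rw [hhead] at hh; exact ha0 hh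
    rw [if_neg hguard]
    have hsplit : H ++ e ++ H.reverse
        = P ++ (List.replicate m0 '0' ++ e ++ (List.replicate m0 '0').reverse) ++ P.reverse := by
      rw [hPZ]; simp [List.reverse_append, List.append_assoc]
    rw [hsplit, pv_strip_sandwich P _ hP h0, ← hsplit]

theorem pv_main (num : String) : largestPalindromic num = largestPalindromic_alt num := by
  unfold largestPalindromic largestPalindromic_alt
  simp only [show PySem.List.pyRange 9 (-1) (-1) = [9,8,7,6,5,4,3,2,1,0] from by decide,
             show PySem.List.pyRange 0 10 1 = [0,1,2,3,4,5,6,7,8,9] from by decide]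
  set l := num.toList with hl
  set counter := PySem.Dict.counter (List.map (fun c => [c]) l) with hcounterdef
  set e := pvFirstOddA counter [9,8,7,6,5,4,3,2,1,0] with hedef
  set counter2 := counter.insert e (counter.getD e 0 - 1) with hc2def
  have hmid : (if ¬e = [] then e else []) = e := by
    by_cases h : e = [] <;> simp [h]
  rw [hmid, pv_bodyA counter2, pv_wrapfold (pvRunA counter2) [0,1,2,3,4,5,6,7,8,9] e,
      show ([0,1,2,3,4,5,6,7,8,9] : List Int).reverse = [9,8,7,6,5,4,3,2,1,0] from by decide]
  -- B side: name the sorted digit list and run the scan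
  rw [pv_sorted_eq l, pv_scan_runsOf l ['9','8','7','6','5','4','3','2','1','0'] (by decide) [] []]
  -- A's first_ch is B's first-odd center
  have he : e = pvFirstOdd l ['9','8','7','6','5','4','3','2','1','0'] := by
    rw [hedef]
    refine pv_first_eq counter l _ _ ?_ rfl
    intro p hp
    fin_cases hp <;>
      exact ⟨by decide, by rw [hcounterdef]; exact pv_counter_get? l _⟩
  have hshape2 := pvFirstOdd_shape l ['9','8','7','6','5','4','3','2','1','0']
  rw [← he] at hshape2
  have hshape : e = [] ∨ e = ['0'] ∨ ∃ c, e = [c] ∧ (c == '0') = false := by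
    rcases hshape2 with h | ⟨c, hcm, hE, hodd⟩
    · exact Or.inl h
    · by_cases hc0 : c = '0'
      · exact Or.inr (Or.inl (hc0 ▸ hE))
      · exact Or.inr (Or.inr ⟨c, hE, by simpa using hc0⟩)
  have htoChars : ∀ n : Nat, n < 10 → PySem.Int.toChars (n : Int) = [pvDg n] := by
    intro n hn; unfold pvDg; interval_cases n <;> decide
  have hget : ∀ n : Nat, n < 10 → counter.get? [pvDg n]
      = if l.count (pvDg n) = 0 then none else some ((l.count (pvDg n) : Nat) : Int) := by
    intro n hn; rw [hcounterdef]; exact pv_counter_get? l (pvDg n)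
  -- the wrapped runs of A are the replicate halves
  have hrun : ∀ n : Nat, n < 10 →
      pvRunA counter2 (n : Int) = List.replicate (l.count (pvDg n) / 2) (pvDg n) := by
    intro n hn
    rcases hshape2 with hE | ⟨c, hcm, hE, hodd⟩
    · apply pv_runA_of_get counter2 _ (pvDg n) (l.count (pvDg n)) (htoChars n hn)
      rw [hc2def, hE]
      rw [PySem.Dict.get?_insert_of_ne _ _ (by simp)]
      exact hget n hn
    · obtain ⟨n0, hn0, rfl⟩ : ∃ n0, n0 < 10 ∧ c = pvDg n0 := by
        fin_cases hcm
        · exact ⟨9, by omega, by decide⟩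
        · exact ⟨8, by omega, by decide⟩
        · exact ⟨7, by omega, by decide⟩
        · exact ⟨6, by omega, by decide⟩
        · exact ⟨5, by omega, by decide⟩
        · exact ⟨4, by omega, by decide⟩
        · exact ⟨3, by omega, by decide⟩
        · exact ⟨2, by omega, by decide⟩
        · exact ⟨1, by omega, by decide⟩
        · exact ⟨0, by omega, by decide⟩
      have hk0ne : l.count (pvDg n0) ≠ 0 := by omega
      have hgetD : counter.getD [pvDg n0] 0 = ((l.count (pvDg n0) : Nat) : Int) := by
        show (counter.get? [pvDg n0]).getD 0 = _
        rw [hget n0 hn0, if_neg hk0ne]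
        rfl
      by_cases hne : n = n0
      · subst hne
        apply pv_runA_dec counter2 _ (pvDg n) (l.count (pvDg n)) (htoChars n hn) hodd
        rw [hc2def, hE, PySem.Dict.get?_insert_self, hgetD]
      · apply pv_runA_of_get counter2 _ (pvDg n) (l.count (pvDg n)) (htoChars n hn)
        rw [hc2def, hE]
        rw [PySem.Dict.get?_insert_of_ne _ _
          (fun h => hne (pv_dg_inj n hn n0 hn0 (by simpa using h)))]
        exact hget n hn
  have h9 := hrun 9 (by omega)
  have h8 := hrun 8 (by omega)
  have h7 := hrun 7 (by omega)
  have h6 := hrun 6 (by omega)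
  have h5 := hrun 5 (by omega)
  have h4 := hrun 4 (by omega)
  have h3 := hrun 3 (by omega)
  have h2 := hrun 2 (by omega)
  have h1 := hrun 1 (by omega)
  have h0 := hrun 0 (by omega)
  simp only [Nat.cast_ofNat, Nat.cast_zero, Nat.cast_one,
    show pvDg 9 = '9' from by decide, show pvDg 8 = '8' from by decide,
    show pvDg 7 = '7' from by decide, show pvDg 6 = '6' from by decide,
    show pvDg 5 = '5' from by decide, show pvDg 4 = '4' from by decide,
    show pvDg 3 = '3' from by decide, show pvDg 2 = '2' from by decide,
    show pvDg 1 = '1' from by decide, show pvDg 0 = '0' from by decide] at h9 h8 h7 h6 h5 h4 h3 h2 h1 h0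
  have hdesc : ([9,8,7,6,5,4,3,2,1,0] : List Int).flatMap (pvRunA counter2)
      = List.replicate (l.count '9' / 2) '9' ++ (List.replicate (l.count '8' / 2) '8' ++
        (List.replicate (l.count '7' / 2) '7' ++ (List.replicate (l.count '6' / 2) '6' ++
        (List.replicate (l.count '5' / 2) '5' ++ (List.replicate (l.count '4' / 2) '4' ++
        (List.replicate (l.count '3' / 2) '3' ++ (List.replicate (l.count '2' / 2) '2' ++
        (List.replicate (l.count '1' / 2) '1' ++ List.replicate (l.count '0' / 2) '0')))))))) := by
    simp only [List.flatMap_cons, List.flatMap_nil, List.append_nil, h9, h8, h7, h6, h5, h4, h3, h2, h1, h0]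
  have hasc : ([0,1,2,3,4,5,6,7,8,9] : List Int).flatMap (pvRunA counter2)
      = (List.replicate (l.count '9' / 2) '9' ++ (List.replicate (l.count '8' / 2) '8' ++
        (List.replicate (l.count '7' / 2) '7' ++ (List.replicate (l.count '6' / 2) '6' ++
        (List.replicate (l.count '5' / 2) '5' ++ (List.replicate (l.count '4' / 2) '4' ++
        (List.replicate (l.count '3' / 2) '3' ++ (List.replicate (l.count '2' / 2) '2' ++
        (List.replicate (l.count '1' / 2) '1' ++ List.replicate (l.count '0' / 2) '0'))))))))).reverse := by
    simp only [List.flatMap_cons, List.flatMap_nil, List.append_nil, h9, h8, h7, h6, h5, h4, h3, h2, h1, h0]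
    simp [List.reverse_append, List.reverse_replicate, List.append_assoc]
  have hhalf : pvHalfOf l ['9','8','7','6','5','4','3','2','1','0']
      = List.replicate (l.count '9' / 2) '9' ++ (List.replicate (l.count '8' / 2) '8' ++
        (List.replicate (l.count '7' / 2) '7' ++ (List.replicate (l.count '6' / 2) '6' ++
        (List.replicate (l.count '5' / 2) '5' ++ (List.replicate (l.count '4' / 2) '4' ++
        (List.replicate (l.count '3' / 2) '3' ++ (List.replicate (l.count '2' / 2) '2' ++
        (List.replicate (l.count '1' / 2) '1' ++ List.replicate (l.count '0' / 2) '0')))))))) := by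
    simp [pvHalfOf]
  simp only [List.nil_append, if_pos rfl]
  rw [hdesc, hasc, hhalf, ← he]
  exact pv_common2 (l.count '9' / 2) (l.count '8' / 2) (l.count '7' / 2) (l.count '6' / 2)
    (l.count '5' / 2) (l.count '4' / 2) (l.count '3' / 2) (l.count '2' / 2)
    (l.count '1' / 2) (l.count '0' / 2) e _ rfl hshape

-- ===== VERDICT (by name: the statement is the Claim_ definition above) =====
theorem largestPalindromic_spec : Claim_equal_largestPalindromic := by
  intro num _
  exact pv_main num
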